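-- pv_equiv track=rewrite | github.com/VitamintK/AlgorithmProblems | GoogleCodeJam/2017/qualification/C_toilets.py | f
-- ===== SOURCE A (Python) =====
-- dp = dict()
--
-- def f(n,k):
--     if (n,k) in dp:
--         return dp[(n,k)]
--     if k == 1:
--         return ((n)//2, (n-1)//2)
--     a1, b1 = f((n-1)//2, k//2)
--     a2, b2 = f(n//2, (k+1)//2)
--     if b2 > b1:
--         aans = a2
--         bans = b2
--     elif a2 > a1:
--         aans = a2
--         bans = b2
--     else:
--         aans = a1
--         bans = b1
--     dp[(n,k)] = (aans, bans)
--     return (aans, bans)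
-- ===== SOURCE B (Python) =====
-- def f(n, k):
--     # descend the bits of k: the k-th arrival (largest-gap-first) lands in the
--     # gap obtained by halving n along k's binary representation
--     while k > 1:
--         n = (n - k % 2) // 2
--         k //= 2
--     return (n // 2, (n - 1) // 2)
-- ===== Notes on version B (the rewrite author's own statement) =====
-- stated objective: simpler
-- what changed: Replaces A's memoized two-branch recursion (solve both half-problems, merge by comparing the two candidate gap pairs) with a five-line loop that descends the binary representation of k, halving n once per bit, and splits the single resulting gap.
-- outside the precondition, e.g. on f(0, 3): A returns (0, -1), B returns (-1, -1); on f(-30, 3): A returns (-4, -5), B returns (-8, -9)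
import Mathlib
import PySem

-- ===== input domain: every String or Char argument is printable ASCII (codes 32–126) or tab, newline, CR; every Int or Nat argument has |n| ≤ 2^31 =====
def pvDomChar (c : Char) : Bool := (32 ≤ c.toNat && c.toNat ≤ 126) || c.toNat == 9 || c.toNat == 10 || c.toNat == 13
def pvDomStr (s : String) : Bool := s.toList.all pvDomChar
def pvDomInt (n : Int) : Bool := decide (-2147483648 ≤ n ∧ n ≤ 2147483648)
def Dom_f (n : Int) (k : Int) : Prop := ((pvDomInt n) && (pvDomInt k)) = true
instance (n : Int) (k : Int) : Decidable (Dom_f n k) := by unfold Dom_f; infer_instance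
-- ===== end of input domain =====

-- B replaces A's memoized two-branch recursion by a five-line loop descending the bits of k (objective: simpler).
-- A's module-level dp dict is ported as a dict threaded through the recursion (a fresh per-call cache returns the
-- same values, since the cached values are pure); the equivalence claimed here is about the return value.

-- ===== PORT A =====
-- fuel-guarded transliteration of A's recursion with its dp cache; fuel k.toNat is always
-- sufficient (k strictly decreases to the k = 1 base), so the 0-fuel row is unreachable for k ≥ 1.
def fGo : Nat → Int → Int → PySem.Dict (Int × Int) (Int × Int) →
    (Int × Int) × PySem.Dict (Int × Int) (Int × Int)
  | 0, _, _, dp => ((0, 0), dp)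
  | fuel+1, n, k, dp =>
    match dp.get? (n, k) with
    | some v => (v, dp)
    | none =>
      if k = 1 then ((PySem.Int.floordiv n 2, PySem.Int.floordiv (n - 1) 2), dp)
      else
        let p1 := fGo fuel (PySem.Int.floordiv (n - 1) 2) (PySem.Int.floordiv k 2) dp
        let p2 := fGo fuel (PySem.Int.floordiv n 2) (PySem.Int.floordiv (k + 1) 2) p1.2
        let ans := if p2.1.2 > p1.1.2 then (p2.1.1, p2.1.2)
                   else if p2.1.1 > p1.1.1 then (p2.1.1, p2.1.2)
                   else (p1.1.1, p1.1.2)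
        (ans, p2.2.insert (n, k) ans)

def f (n : Int) (k : Int) : Int × Int := (fGo k.toNat n k PySem.Dict.empty).1

-- ===== PORT B =====
-- fuel-guarded transliteration of B's while loop (k halves each pass, so fuel k.toNat suffices)
def fAltGo : Nat → Int → Int → Int
  | 0, n, _ => n
  | fuel+1, n, k =>
    if 1 < k then
      fAltGo fuel (PySem.Int.floordiv (n - PySem.Int.mod k 2) 2) (PySem.Int.floordiv k 2)
    else n

def f_alt (n : Int) (k : Int) : Int × Int :=
  let g := fAltGo k.toNat n k
  (PySem.Int.floordiv g 2, PySem.Int.floordiv (g - 1) 2)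

-- ===== PRECONDITION & SPEC =====
-- Pre_f is the task's natural domain (n stalls, k-th person, at most one person per stall,
-- widened to k ≤ 2n+2 and to every n when k ≤ 2): outside it A either diverges (k ≤ 0) or
-- returns values for overfull / negative-stall inputs that no caller specifies.
def Pre_f (n : Int) (k : Int) : Prop := 1 ≤ k ∧ (3 ≤ k → k ≤ 2*n + 2)
instance (n : Int) (k : Int) : Decidable (Pre_f n k) := by unfold Pre_f; infer_instance
def pvWitness_f : Int × Int := (5, 3)

def Spec_f (n : Int) (k : Int) (out : Int × Int) : Prop := out = f_alt n k
instance (n : Int) (k : Int) (out : Int × Int) : Decidable (Spec_f n k out) := by unfold Spec_f; infer_instance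

-- ===== CLAIM (what is proved, stated in full; the proofs are below) =====
def Claim_equal_f : Prop := ∀ (n : Int) (k : Int), Dom_f n k → Pre_f n k → Spec_f n k (f n k)

-- ===== LEMMAS AND PROOFS =====

-- the pair A returns for a gap g: (g//2, (g-1)//2), in ediv form
def esplit (g : Int) : Int × Int := (g / 2, (g - 1) / 2)

-- closed form of B's loop: the gap the k-th arrival takes, 2^t ≤ k < 2^(t+1)
def gcl (n k : Int) (t : Nat) : Int := (n - k + 2^t) / 2^t

-- A's merge of the two candidate answers (proof-side name for the inlined if-chain)
def merge (p q : Int × Int) : Int × Int :=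
  if q.2 > p.2 then (q.1, q.2) else if q.1 > p.1 then (q.1, q.2) else (p.1, p.2)

-- pure (cache-free) reference form of A's recursion
def FA (n k : Int) : Int × Int :=
  if h : 1 < k then merge (FA ((n-1)/2) (k/2)) (FA (n/2) ((k+1)/2))
  else (n / 2, (n - 1) / 2)
termination_by k.toNat
decreasing_by
  · omega
  · omega

-- region on which A's recursion is exactly largest-gap-first (contains Pre_f)
def Cond (n k : Int) : Prop :=
  1 ≤ k ∧ (2 ≤ k → k ≤ 2*n + 3 ∧ ¬(k = 2*n + 3 ∧ ∃ s : Nat, n + 2 = 2^s))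

-- a cache is good when every stored value is the pure value of its key
def Good (dp : PySem.Dict (Int × Int) (Int × Int)) : Prop :=
  ∀ p v, dp.get? p = some v → v = FA p.1 p.2

theorem fd2 (a : Int) : PySem.Int.floordiv a 2 = a / 2 :=
  PySem.Int.floordiv_eq_ediv_of_pos (by norm_num)

theorem md2 (a : Int) : PySem.Int.mod a 2 = a % 2 :=
  PySem.Int.mod_eq_emod_of_pos (by norm_num)

theorem FA_one (n : Int) : FA n 1 = (n / 2, (n - 1) / 2) := by
  rw [FA]; norm_num

theorem FA_succ (n k : Int) (h : 1 < k) :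
    FA n k = merge (FA ((n-1)/2) (k/2)) (FA (n/2) ((k+1)/2)) := by
  rw [FA]; rw [dif_pos h]

theorem good_empty : Good PySem.Dict.empty := by
  intro p v h
  rw [PySem.Dict.get?_empty] at h
  exact absurd h (by simp)

theorem good_insert (dp : PySem.Dict (Int × Int) (Int × Int)) (key : Int × Int) (v : Int × Int)
    (h : Good dp) (hv : v = FA key.1 key.2) : Good (dp.insert key v) := by
  intro p w hpw
  rw [PySem.Dict.get?_insert] at hpw
  split_ifs at hpw with hp
  · subst hp
    rw [← Option.some.inj hpw]
    exact hv
  · exact h p w hpw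

theorem memo (fuel : Nat) : ∀ (n k : Int) (dp : PySem.Dict (Int × Int) (Int × Int)),
    1 ≤ k → k.toNat ≤ fuel → Good dp →
    (fGo fuel n k dp).1 = FA n k ∧ Good (fGo fuel n k dp).2 := by
  induction fuel with
  | zero => intro n k dp hk hf _; exact absurd hf (by omega)
  | succ F IH =>
    intro n k dp hk hf hg
    rcases hget : dp.get? (n, k) with _ | v
    · by_cases hk1 : k = 1
      · subst hk1
        refine ⟨?_, ?_⟩
        · show (fGo (F+1) n 1 dp).1 = FA n 1
          simp only [fGo, hget]
          rw [FA_one, fd2, fd2]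
          simp
        · show Good (fGo (F+1) n 1 dp).2
          simp only [fGo, hget]
          simpa using hg
      · have hk2 : (2:Int) ≤ k := by omega
        have h1 := IH ((n-1)/2) (k/2) dp (by omega) (by omega) hg
        have h2 := IH (n/2) ((k+1)/2) (fGo F ((n-1)/2) (k/2) dp).2 (by omega) (by omega) h1.2
        have hansm : merge (fGo F ((n-1)/2) (k/2) dp).1
            (fGo F (n/2) ((k+1)/2) (fGo F ((n-1)/2) (k/2) dp).2).1 = FA n k := by
          rw [h1.1, h2.1, ← FA_succ n k (by omega)]
        simp only [fGo, hget, if_neg hk1, fd2]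
        exact ⟨hansm, good_insert _ (n, k) _ h2.2 hansm⟩
    · simp only [fGo, hget]
      exact ⟨hg (n, k) v hget, hg⟩

theorem f_eq_FA (n k : Int) (hk : 1 ≤ k) : f n k = FA n k :=
  (memo k.toNat n k PySem.Dict.empty hk le_rfl good_empty).1

theorem one_le_two_pow {t : Nat} : (1 : Int) ≤ 2^t := one_le_pow₀ (by norm_num)

theorem two_pow_succ (t : Nat) : (2:Int)^(t+1) = 2 * 2^t := by rw [pow_succ]; ring

theorem gcl_step (n k : Int) (t : Nat) :
    gcl ((n - k % 2)/2) (k/2) t = gcl n k (t+1) := by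
  unfold gcl
  have hP : (0:Int) < 2^t := by positivity
  rw [show n - k % 2 = (n - k) + (k/2) * 2 by omega,
      Int.add_mul_ediv_right _ _ (by norm_num : (2:Int) ≠ 0),
      show (n-k)/2 + k/2 - k/2 + 2^t = (n-k)/2 + 1 * 2^t by ring,
      Int.add_mul_ediv_right _ _ (by omega : (2:Int)^t ≠ 0),
      Int.ediv_ediv_of_nonneg (by norm_num : (0:Int) ≤ 2),
      show n - k + 2^(t+1) = (n - k) + 1 * 2^(t+1) by ring,
      Int.add_mul_ediv_right _ _ (by positivity : (2:Int)^(t+1) ≠ 0),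
      two_pow_succ]

theorem merge_right (g1 g2 : Int) (h1 : g1 ≤ g2) (h2 : g2 ≤ g1 + 1) :
    merge (esplit g1) (esplit g2) = esplit g2 := by
  unfold merge esplit
  split_ifs with h h' <;> simp_all <;> constructor <;> omega

theorem merge_left (g1 g2 : Int) (h : g2 ≤ g1) :
    merge (esplit g1) (esplit g2) = esplit g1 := by
  unfold merge esplit
  split_ifs with h h' <;> simp_all <;> constructor <;> omega

theorem lip (x d : Int) (hd : 0 < d) : x / d ≤ (x+1) / d ∧ (x+1) / d ≤ x / d + 1 := by
  refine ⟨Int.ediv_le_ediv hd (by omega), ?_⟩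
  have h1 : (x+1) / d ≤ (x + 1*d) / d := Int.ediv_le_ediv hd (by omega)
  rw [Int.add_mul_ediv_right x 1 (by omega : d ≠ 0)] at h1
  omega

theorem ineq7 (P n : Int) (hP : 0 < P) (hPn : P ≤ n + 1) (hn : 0 ≤ n) :
    n / (2*P) + 1 ≤ (n+1) / P := by
  have h2P : (0:Int) < 2*P := by omega
  have hmod := Int.emod_add_mul_ediv n (2*P)
  have hmnn := Int.emod_nonneg n (by omega : 2*P ≠ 0)
  by_cases hc : n / (2*P) = 0
  · have : 1 ≤ (n+1)/P := (Int.le_ediv_iff_mul_le hP).2 (by omega)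
    omega
  · have hc1 : 1 ≤ n / (2*P) := by
      rcases lt_or_gt_of_ne hc with h | h
      · exfalso; have := Int.ediv_nonneg hn (le_of_lt h2P); omega
      · omega
    have h3 : (2*P*(n/(2*P))) / P ≤ (n+1)/P := Int.ediv_le_ediv hP (by nlinarith [hmod, hmnn])
    have h4 : (2*P*(n/(2*P)))/P = 2*(n/(2*P)) := by
      rw [show 2*P*(n/(2*P)) = (2*(n/(2*P)))*P by ring, Int.mul_ediv_cancel _ (by omega)]
    omega

theorem pow_unique (t u : Nat) (k : Int)
    (h1 : 2^t ≤ k) (h2 : k < 2^(t+1)) (h3 : 2^u ≤ k) (h4 : k < 2^(u+1)) : t = u := by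
  by_contra hne
  rcases Nat.lt_or_ge t u with h | h
  · have : (2:Int)^(t+1) ≤ 2^u := pow_le_pow_right₀ (by norm_num) (by omega)
    omega
  · have hu : u < t := by omega
    have : (2:Int)^(u+1) ≤ 2^t := pow_le_pow_right₀ (by norm_num) (by omega)
    omega

theorem exists_bounds (k : Int) (hk : 1 ≤ k) : ∃ t : Nat, (2:Int)^t ≤ k ∧ k < 2^(t+1) := by
  refine ⟨k.toNat.log2, ?_, ?_⟩
  · have h := Nat.log2_self_le (n := k.toNat) (by omega)
    have : ((2^k.toNat.log2 : Nat) : Int) ≤ (k.toNat : Int) := by exact_mod_cast h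
    push_cast at this; omega
  · have h := Nat.lt_log2_self (n := k.toNat)
    have : ((k.toNat : Int)) < ((2^(k.toNat.log2+1) : Nat) : Int) := by exact_mod_cast h
    push_cast at this; omega

theorem altgo (fuel : Nat) : ∀ (n k : Int) (t : Nat), k.toNat ≤ fuel →
    (2:Int)^t ≤ k → k < 2^(t+1) → fAltGo fuel n k = gcl n k t := by
  induction fuel with
  | zero =>
    intro n k t hf hlo hhi
    have := le_trans one_le_two_pow hlo
    omega
  | succ F IH =>
    intro n k t hf hlo hhi
    have hk1 : (1:Int) ≤ k := le_trans one_le_two_pow hlo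
    by_cases hk : 1 < k
    · cases t with
      | zero => exfalso; norm_num at hhi; omega
      | succ t' =>
        have hP1 : (1:Int) ≤ 2^t' := one_le_two_pow
        have e1 : (2:Int)^(t'+1) = 2*2^t' := two_pow_succ t'
        have e2 : (2:Int)^(t'+1+1) = 2*2^(t'+1) := two_pow_succ (t'+1)
        show fAltGo (F+1) n k = _
        rw [show fAltGo (F+1) n k = if 1 < k then fAltGo F (PySem.Int.floordiv (n - PySem.Int.mod k 2) 2) (PySem.Int.floordiv k 2) else n from rfl,
            if_pos hk]
        simp only [md2, fd2]
        rw [IH ((n - k % 2)/2) (k/2) t' (by omega) (by omega) (by omega), gcl_step]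
    · have hkv : k = 1 := by omega
      subst hkv
      have ht : t = 0 := by
        cases t with
        | zero => rfl
        | succ t' => exfalso
                     have : (1:Int) ≤ 2^t' := one_le_two_pow
                     have := two_pow_succ t'
                     omega
      subst ht
      rw [show fAltGo (F+1) n 1 = if (1:Int) < 1 then fAltGo F (PySem.Int.floordiv (n - PySem.Int.mod 1 2) 2) (PySem.Int.floordiv 1 2) else n from rfl,
          if_neg (by norm_num)]
      unfold gcl; norm_num

theorem f_alt_eq (n k : Int) (t : Nat) (h1 : (2:Int)^t ≤ k) (h2 : k < 2^(t+1)) :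
    f_alt n k = esplit (gcl n k t) := by
  have hk : 1 ≤ k := le_trans one_le_two_pow h1
  show (PySem.Int.floordiv (fAltGo k.toNat n k) 2, PySem.Int.floordiv (fAltGo k.toNat n k - 1) 2)
      = esplit (gcl n k t)
  rw [altgo k.toNat n k t le_rfl h1 h2, fd2, fd2]
  rfl

theorem main (K : Nat) : ∀ (k n : Int) (t : Nat), k.toNat ≤ K →
    (2:Int)^t ≤ k → k < 2^(t+1) →
    (Cond n k → FA n k = esplit (gcl n k t)) ∧
    (∀ s : Nat, 1 ≤ s → k = 2^(s+1) - 1 → n = 2^s - 2 → FA n k = (0, -1)) := by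
  induction K using Nat.strong_induction_on with
  | _ K IH =>
  intro k n t hK hlo hhi
  have hk1 : (1:Int) ≤ k := le_trans one_le_two_pow hlo
  by_cases hk : k = 1
  · subst hk
    have ht : t = 0 := by
      cases t with
      | zero => rfl
      | succ t' =>
        exfalso
        have h1 : (1:Int) ≤ 2^t' := one_le_two_pow
        have h2 := two_pow_succ t'
        omega
    subst ht
    constructor
    · intro _
      rw [FA_one]
      unfold esplit gcl
      norm_num
    · intro s hs hkk _
      exfalso
      have h1 : (1:Int) ≤ 2^s := one_le_two_pow
      have h2 := two_pow_succ s
      have h3 : (2:Int) ≤ 2^s := by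
        calc (2:Int) = 2^1 := by norm_num
        _ ≤ 2^s := pow_le_pow_right₀ (by norm_num) hs
      omega
  · have hk2 : (2:Int) ≤ k := by omega
    cases t with
    | zero => exfalso; norm_num at hhi; omega
    | succ t' =>
    have hP1 : (1:Int) ≤ 2^t' := one_le_two_pow
    have e1 : (2:Int)^(t'+1) = 2*2^t' := two_pow_succ t'
    have e2 : (2:Int)^(t'+1+1) = 4*2^t' := by rw [two_pow_succ (t'+1), e1]; ring
    have hlo' : 2*2^t' ≤ k := by omega
    have hhi' : k < 4*2^t' := by omega
    have hm1 : 1 ≤ k/2 := by omega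
    have hmlt : (k/2).toNat < K := by omega
    have hm_lo : (2:Int)^t' ≤ k/2 := by omega
    have hm_hi : k/2 < 2^(t'+1) := by omega
    constructor
    · -- Cond conjunct
      intro hc
      obtain ⟨-, hcc⟩ := hc
      obtain ⟨hbound, hnexc⟩ := hcc hk2
      rw [FA_succ n k (by omega)]
      rcases Int.emod_two_eq k with hk0 | hk0
      · -- k even, k = 2*(k/2)
        rw [show (k+1)/2 = k/2 by omega]
        have hcond2 : Cond (n/2) (k/2) := by
          refine ⟨hm1, fun h2m => ⟨by omega, ?_⟩⟩
          rintro ⟨habs, -⟩; omega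
        have hr2 := (IH (k/2).toNat hmlt (k/2) (n/2) t' le_rfl hm_lo hm_hi).1 hcond2
        have hg2 : gcl (n/2) (k/2) t' = gcl n k (t'+1) := by
          have h := gcl_step n k t'
          rw [hk0, sub_zero] at h
          exact h
        by_cases hexc : 2 ≤ k/2 ∧ k/2 = 2*((n-1)/2) + 3 ∧ ∃ s : Nat, (n-1)/2 + 2 = 2^s
        · obtain ⟨h2m, hm3, s, hps⟩ := hexc
          have hQ1 : (1:Int) ≤ 2^s := one_le_two_pow
          have eQ : (2:Int)^(s+1) = 2*2^s := two_pow_succ s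
          have hs1 : 1 ≤ s := by
            rcases Nat.eq_zero_or_pos s with h | h
            · exfalso; subst h; norm_num at hps; omega
            · exact h
          have hr1 := (IH (k/2).toNat hmlt (k/2) ((n-1)/2) s le_rfl
              (by omega) (by omega)).2 s hs1 (by omega) (by omega)
          have hn2 : n = 2*2^s - 2 := by omega
          have ht' : t' = s := by
            have b1 : (2:Int)^(s+1) ≤ k := by omega
            have b2 : k < 2^(s+1+1) := by rw [two_pow_succ (s+1)]; omega
            have := pow_unique (t'+1) (s+1) k (by omega) (by omega) b1 b2
            omega
          have hg20 : gcl n k (t'+1) = 0 := by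
            unfold gcl
            rw [ht', show n - k + 2^(s+1) = 0 by omega]
            exact Int.zero_ediv _
          rw [hr1, hr2, hg2, hg20]
          norm_num [merge, esplit]
        · have hcond1 : Cond ((n-1)/2) (k/2) := by
            refine ⟨hm1, fun h2m => ⟨by omega, ?_⟩⟩
            rintro ⟨ha, hb⟩; exact hexc ⟨h2m, ha, hb⟩
          have hr1 := (IH (k/2).toNat hmlt (k/2) ((n-1)/2) t' le_rfl hm_lo hm_hi).1 hcond1
          have hg1 : gcl ((n-1)/2) (k/2) t' = gcl (n-1) k (t'+1) := by
            have h := gcl_step (n-1) k t'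
            rw [hk0, sub_zero] at h
            exact h
          have hlip := lip (n-1-k+2^(t'+1)) (2^(t'+1)) (by positivity)
          rw [show n-1-k+2^(t'+1)+1 = n-k+2^(t'+1) by ring] at hlip
          rw [hr1, hr2, hg1, hg2]
          exact merge_right _ _ hlip.1 hlip.2
      · -- k odd, k = 2*(k/2)+1
        rw [show (k+1)/2 = k/2 + 1 by omega]
        have hmlt2 : (k/2+1).toNat < K := by omega
        have hg1 : gcl ((n-1)/2) (k/2) t' = gcl n k (t'+1) := by
          have h := gcl_step n k t'
          rw [hk0] at h
          exact h
        have hbound' : k/2 ≤ n + 1 := by omega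
        have hcond1 : Cond ((n-1)/2) (k/2) := by
          refine ⟨hm1, fun h2m => ⟨by omega, ?_⟩⟩
          rintro ⟨ha, s, hps⟩
          refine hnexc ⟨by omega, s+1, ?_⟩
          rw [two_pow_succ s]; omega
        have hr1 := (IH (k/2).toNat hmlt (k/2) ((n-1)/2) t' le_rfl hm_lo hm_hi).1 hcond1
        by_cases hpow : k/2 + 1 = 2*2^t'
        · -- the next arrival count is an exact power of two
          have hcond2 : Cond (n/2) (k/2+1) := by
            refine ⟨by omega, fun _ => ⟨by omega, ?_⟩⟩
            rintro ⟨ha, -⟩; omega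
          have hb_lo : (2:Int)^(t'+1) ≤ k/2+1 := by omega
          have hb_hi : k/2+1 < 2^(t'+1+1) := by omega
          have hr2 := (IH (k/2+1).toNat hmlt2 (k/2+1) (n/2) (t'+1) le_rfl hb_lo hb_hi).1 hcond2
          have hg2v : gcl (n/2) (k/2+1) (t'+1) = n / (4*2^t') := by
            unfold gcl
            rw [show n/2 - (k/2+1) + 2^(t'+1) = n/2 by omega,
                Int.ediv_ediv_of_nonneg (by norm_num : (0:Int) ≤ 2)]
            congr 1
            omega
          have hg1v : gcl n k (t'+1) = (n+1)/(2*2^t') - 1 := by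
            unfold gcl
            rw [e1, show n - k + 2*2^t' = (n+1) + (-1)*(2*2^t') by omega,
                Int.add_mul_ediv_right _ _ (by omega : 2*(2:Int)^t' ≠ 0)]
            ring
          have hn0 : (0:Int) ≤ n := by omega
          have h2Pn : 2*2^t' ≤ n + 1 := by
            by_contra hcon
            exact hnexc ⟨by omega, t'+1, by omega⟩
          have hineq := ineq7 (2*2^t') n (by omega) h2Pn hn0
          rw [show 2*(2*(2:Int)^t') = 4*2^t' by ring] at hineq
          rw [hr1, hr2, hg1, hg2v]
          apply merge_left
          rw [hg1v]
          omega
        · have hm1hi : k/2 + 1 < 2*2^t' := by omega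
          by_cases hexc2 : k/2 + 1 = 2*(n/2) + 3 ∧ ∃ s : Nat, n/2 + 2 = 2^s
          · obtain ⟨ha, s, hps⟩ := hexc2
            have hQ1 : (1:Int) ≤ 2^s := one_le_two_pow
            have eQ : (2:Int)^(s+1) = 2*2^s := two_pow_succ s
            have hs1 : 1 ≤ s := by
              rcases Nat.eq_zero_or_pos s with h | h
              · exfalso; subst h; norm_num at hps; omega
              · exact h
            have hQ2 : (2:Int) ≤ 2^s := by
              calc (2:Int) = 2^1 := by norm_num
              _ ≤ 2^s := pow_le_pow_right₀ (by norm_num) hs1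
            have hr2 := (IH (k/2+1).toNat hmlt2 (k/2+1) (n/2) s le_rfl
                (by omega) (by omega)).2 s hs1 (by omega) (by omega)
            have hkv : k = 4*2^s - 3 := by omega
            have ht' : t' = s := by
              have b1 : (2:Int)^(s+1) ≤ k := by omega
              have b2 : k < 2^(s+1+1) := by rw [two_pow_succ (s+1)]; omega
              have := pow_unique (t'+1) (s+1) k (by omega) (by omega) b1 b2
              omega
            have hg10 : gcl n k (t'+1) = 0 := by
              unfold gcl
              rw [ht', show n - k + 2^(s+1) = 0 by omega]
              exact Int.zero_ediv _
            rw [hr1, hr2, hg1, hg10]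
            norm_num [merge, esplit]
          · have hcond2 : Cond (n/2) (k/2+1) := by
              refine ⟨by omega, fun _ => ⟨by omega, ?_⟩⟩
              rintro ⟨ha, hb⟩; exact hexc2 ⟨ha, hb⟩
            have hr2 := (IH (k/2+1).toNat hmlt2 (k/2+1) (n/2) t' le_rfl
                (by omega) (by omega)).1 hcond2
            have hg2b : gcl (n/2) (k/2+1) t' = gcl n (2*(k/2)+2) (t'+1) := by
              have h := gcl_step n (2*(k/2)+2) t'
              rw [show (2*(k/2)+2) % 2 = 0 by omega, show (2*(k/2)+2)/2 = k/2+1 by omega,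
                  sub_zero] at h
              exact h
            have hmono : gcl n (2*(k/2)+2) (t'+1) ≤ gcl n k (t'+1) := by
              unfold gcl
              exact Int.ediv_le_ediv (by positivity) (by omega)
            rw [hr1, hr2, hg1, hg2b]
            exact merge_left _ _ hmono
    · -- Exc conjunct
      intro s hs hkk hnn
      have hQ1 : (1:Int) ≤ 2^s := one_le_two_pow
      have eQ : (2:Int)^(s+1) = 2*2^s := two_pow_succ s
      have hQ2 : (2:Int) ≤ 2^s := by
        calc (2:Int) = 2^1 := by norm_num
        _ ≤ 2^s := pow_le_pow_right₀ (by norm_num) hs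
      have hkv : k = 2*2^s - 1 := by omega
      have hnv : n = 2^s - 2 := by omega
      rw [FA_succ n k (by omega)]
      rcases Nat.lt_or_ge s 2 with hs2 | hs2
      · -- s = 1 : k = 3, n = 0
        have hsv : s = 1 := by omega
        have hQv : (2:Int)^s = 2 := by rw [hsv]; norm_num
        rw [show (n-1)/2 = -1 by omega, show k/2 = 1 by omega, show (k+1)/2 = 2 by omega,
            FA_one]
        have hc2 : Cond (n/2) 2 := ⟨by norm_num, fun _ => ⟨by omega, by rintro ⟨h,-⟩; omega⟩⟩
        have hr2 := (IH 2 (by omega) 2 (n/2) 1 (by norm_num)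
            (by norm_num) (by norm_num)).1 hc2
        rw [hr2, show gcl (n/2) 2 1 = 0 by
          unfold gcl
          rw [show n/2 - 2 + 2^1 = 0 by omega]
          exact Int.zero_ediv _]
        norm_num [merge, esplit]
      · -- s ≥ 2
        have hR1 : (1:Int) ≤ 2^(s-1) := one_le_two_pow
        have hQR : (2:Int)^s = 2*2^(s-1) := by
          rw [← two_pow_succ (s-1)]
          congr 1
          omega
        have hs11 : 1 ≤ s - 1 := by omega
        have hr1 := (IH (k/2).toNat hmlt (k/2) ((n-1)/2) (s-1) le_rfl
            (by omega) (by omega)).2 (s-1) hs11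
            (by rw [show s-1+1 = s by omega]; omega) (by omega)
        have hc2 : Cond (n/2) (2^s) := by
          refine ⟨by omega, fun _ => ⟨by omega, ?_⟩⟩
          rintro ⟨h, -⟩; omega
        have hr2 := (IH (2^s : Int).toNat (by omega) (2^s) (n/2) s (by omega)
            le_rfl (by omega)).1 hc2
        have hg0 : gcl (n/2) (2^s) s = 0 := by
          unfold gcl
          rw [show n/2 - 2^s + 2^s = 2^(s-1) - 1 by omega]
          exact Int.ediv_eq_zero_of_lt (by omega) (by omega)
        rw [show (k+1)/2 = 2^s by omega, hr1, hr2, hg0]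
        norm_num [merge, esplit]

theorem FA_two (n : Int) : FA n 2 = esplit (gcl n 2 1) := by
  rw [FA_succ n 2 (by norm_num), show ((2:Int))/2 = 1 by norm_num,
      show ((2:Int)+1)/2 = 1 by norm_num, FA_one, FA_one,
      show gcl n 2 1 = n/2 by unfold gcl; norm_num]
  exact merge_right ((n-1)/2) (n/2) (by omega) (by omega)

-- ===== VERDICT (by name: the statement is the Claim_ definition above) =====
theorem f_spec : Claim_equal_f := by
  intro n k _hdom hpre
  unfold Spec_f
  obtain ⟨hk1, hk2⟩ := hpre
  by_cases hk3 : 3 ≤ k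
  · obtain ⟨t, hlo, hhi⟩ := exists_bounds k hk1
    have hc : Cond n k := ⟨hk1, fun _ => ⟨by have := hk2 hk3; omega,
      by rintro ⟨h3, s, hs⟩; have := hk2 hk3; omega⟩⟩
    have hA := (main k.toNat k n t le_rfl hlo hhi).1 hc
    rw [f_eq_FA n k hk1, hA, f_alt_eq n k t hlo hhi]
  · have : k = 1 ∨ k = 2 := by omega
    rcases this with rfl | rfl
    · rw [f_eq_FA n 1 (by norm_num), f_alt_eq n 1 0 (by norm_num) (by norm_num), FA_one,
          show gcl n 1 0 = n by unfold gcl; norm_num]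
      rfl
    · rw [f_eq_FA n 2 (by norm_num), f_alt_eq n 2 1 (by norm_num) (by norm_num), FA_two]
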